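-- pv_equiv track=rewrite | github.com/aninspace/ft_ality | src/parsing.py | fold_lines
-- ===== SOURCE A (Python) =====
-- def fold_lines(parsed_lines, accumulators, index):
--     if index >= len(parsed_lines):
--         return accumulators
--
--     line_type, content = parsed_lines[index]
--     actions, combinations = accumulators
--
--     if line_type == 'action':
--         hook, action = content
--         if hook in actions:
--             actions[hook].append(action.replace("_", " "))
--         else:
--             actions[hook] = [action.replace("_", " ")]
--     elif line_type == 'combination':
--         hooks, action = content
--         combinations[tuple(hooks.split("+"))] = action.replace("_", " ")
--
--     return fold_lines(parsed_lines, (actions, combinations), index + 1)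
-- ===== SOURCE B (Python) =====
-- def fold_lines(parsed_lines, accumulators, index):
--     actions, combinations = accumulators
--     for i in range(index, len(parsed_lines)):
--         line_type, content = parsed_lines[i]
--         if line_type == 'action':
--             hook, action = content
--             actions.setdefault(hook, []).append(action.replace("_", " "))
--         elif line_type == 'combination':
--             hooks, action = content
--             combinations[tuple(hooks.split("+"))] = action.replace("_", " ")
--     return actions, combinations
-- ===== Notes on version B (the rewrite author's own statement) =====
-- stated objective: idiomatic
-- what changed: Replaced the tail recursion (one call frame per line, rebuilding the accumulator tuple each step) by a single iterative for-loop over range(index, len(parsed_lines)) with dict.setdefault for the grouping, returning the accumulators once at the end.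
import Mathlib
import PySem

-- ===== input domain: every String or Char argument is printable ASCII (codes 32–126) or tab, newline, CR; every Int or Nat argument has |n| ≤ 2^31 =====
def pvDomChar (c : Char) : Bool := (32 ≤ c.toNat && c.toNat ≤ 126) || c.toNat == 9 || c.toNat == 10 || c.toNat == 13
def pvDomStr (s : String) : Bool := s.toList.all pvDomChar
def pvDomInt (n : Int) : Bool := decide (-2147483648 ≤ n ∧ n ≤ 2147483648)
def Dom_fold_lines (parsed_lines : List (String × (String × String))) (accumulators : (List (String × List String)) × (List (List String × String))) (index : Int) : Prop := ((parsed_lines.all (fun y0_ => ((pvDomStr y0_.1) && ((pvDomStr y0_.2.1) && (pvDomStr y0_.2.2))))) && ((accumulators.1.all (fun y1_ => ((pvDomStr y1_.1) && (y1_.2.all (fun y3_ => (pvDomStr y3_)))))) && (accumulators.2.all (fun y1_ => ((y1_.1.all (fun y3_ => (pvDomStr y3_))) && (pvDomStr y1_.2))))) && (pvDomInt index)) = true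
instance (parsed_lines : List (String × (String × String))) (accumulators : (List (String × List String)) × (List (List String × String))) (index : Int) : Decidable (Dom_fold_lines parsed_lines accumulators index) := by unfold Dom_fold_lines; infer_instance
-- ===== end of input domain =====

-- ===== PORT A =====
-- Port of A (the tail recursion over `index`; A returns the accumulators tuple — both Pythons
-- mutate the dicts in place, the equivalence proved here is about the returned value).
def fold_lines (parsed_lines : List (String × (String × String))) (accumulators : (List (String × List String)) × (List (List String × String))) (index : Int) : (List (String × List String)) × (List (List String × String)) :=
  if _h : (parsed_lines.length : Int) ≤ index then accumulators
  else
    match PySem.List.pyGet? parsed_lines index with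
    | none => accumulators  -- parsed_lines[index] raises IndexError: excluded by Pre_
    | some (line_type, content) =>
      let actions := PySem.Dict.mk accumulators.1
      let combinations := PySem.Dict.mk accumulators.2
      let actions' :=
        if line_type == "action" then
          (if actions.contains content.1 then
            actions.modify content.1 [] (fun l => l ++ [PySem.Str.replace content.2 "_" " "])
          else
            actions.insert content.1 [PySem.Str.replace content.2 "_" " "])
        else actions
      let combinations' :=
        if line_type == "action" then combinations
        else if line_type == "combination" then
          combinations.insert ((PySem.Str.split? content.1 "+").getD []) (PySem.Str.replace content.2 "_" " ")
        else combinations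
      fold_lines parsed_lines (actions'.items, combinations'.items) (index + 1)
termination_by ((parsed_lines.length : Int) - index).toNat
decreasing_by omega

-- ===== PORT B =====
-- Port of B (one iterative pass: for i in range(index, len(parsed_lines)); dict.setdefault(...).append
-- is Dict.modify with default []).
def fold_lines_alt (parsed_lines : List (String × (String × String))) (accumulators : (List (String × List String)) × (List (List String × String))) (index : Int) : (List (String × List String)) × (List (List String × String)) :=
  (PySem.List.pyRange index parsed_lines.length 1).foldl
    (fun st i =>
      match PySem.List.pyGet? parsed_lines i with
      | none => st  -- parsed_lines[i] raises IndexError: excluded by Pre_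
      | some (line_type, content) =>
        if line_type == "action" then
          (((PySem.Dict.mk st.1).modify content.1 [] (fun l => l ++ [PySem.Str.replace content.2 "_" " "])).items, st.2)
        else if line_type == "combination" then
          (st.1, ((PySem.Dict.mk st.2).insert ((PySem.Str.split? content.1 "+").getD []) (PySem.Str.replace content.2 "_" " ")).items)
        else st)
    accumulators

-- ===== PRECONDITION & SPEC =====
-- Pre_ excludes exactly the inputs where Python A raises IndexError: index < -len(parsed_lines)
-- (and index < len, i.e. the initial parsed_lines[index] access is out of range).
def Pre_fold_lines (parsed_lines : List (String × (String × String))) (accumulators : (List (String × List String)) × (List (List String × String))) (index : Int) : Prop :=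
  -(parsed_lines.length : Int) ≤ index
instance (parsed_lines : List (String × (String × String))) (accumulators : (List (String × List String)) × (List (List String × String))) (index : Int) : Decidable (Pre_fold_lines parsed_lines accumulators index) := by unfold Pre_fold_lines; infer_instance
def pvWitness_fold_lines : (List (String × (String × String))) × ((List (String × List String)) × (List (List String × String))) × Int :=
  ([("action", ("KEY", "punch_hard")), ("combination", ("a+b", "combo_move"))], ([("KEY", ["jab"])], []), 0)
def Spec_fold_lines (parsed_lines : List (String × (String × String))) (accumulators : (List (String × List String)) × (List (List String × String))) (index : Int) (out : (List (String × List String)) × (List (List String × String))) : Prop := out = fold_lines_alt parsed_lines accumulators index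
instance (parsed_lines : List (String × (String × String))) (accumulators : (List (String × List String)) × (List (List String × String))) (index : Int) (out : (List (String × List String)) × (List (List String × String))) : Decidable (Spec_fold_lines parsed_lines accumulators index out) := by unfold Spec_fold_lines; infer_instance

-- ===== CLAIM (what is proved, stated in full; the proofs are below) =====
def Claim_equal_fold_lines : Prop := ∀ (parsed_lines : List (String × (String × String))) (accumulators : (List (String × List String)) × (List (List String × String))) (index : Int), Dom_fold_lines parsed_lines accumulators index → Pre_fold_lines parsed_lines accumulators index → Spec_fold_lines parsed_lines accumulators index (fold_lines parsed_lines accumulators index)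

-- ===== LEMMAS AND PROOFS =====

-- B makes one more step of the loop when index < len.
theorem fold_lines_alt_step (parsed_lines : List (String × (String × String)))
    (accumulators : (List (String × List String)) × (List (List String × String))) (index : Int)
    (h : index < (parsed_lines.length : Int)) :
    fold_lines_alt parsed_lines accumulators index =
      fold_lines_alt parsed_lines
        (match PySem.List.pyGet? parsed_lines index with
         | none => accumulators
         | some (line_type, content) =>
           if line_type == "action" then
             (((PySem.Dict.mk accumulators.1).modify content.1 [] (fun l => l ++ [PySem.Str.replace content.2 "_" " "])).items, accumulators.2)
           else if line_type == "combination" then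
             (accumulators.1, ((PySem.Dict.mk accumulators.2).insert ((PySem.Str.split? content.1 "+").getD []) (PySem.Str.replace content.2 "_" " ")).items)
           else accumulators)
        (index + 1) := by
  unfold fold_lines_alt
  rw [PySem.List.pyRange_one_cons h, List.foldl_cons]

theorem fold_lines_eq_alt (parsed_lines : List (String × (String × String)))
    (accumulators : (List (String × List String)) × (List (List String × String))) (index : Int) :
    -(parsed_lines.length : Int) ≤ index →
    fold_lines parsed_lines accumulators index = fold_lines_alt parsed_lines accumulators index := by
  fun_induction fold_lines parsed_lines accumulators index with
  | case1 acc idx h =>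
    intro _
    unfold fold_lines_alt
    rw [PySem.List.pyRange_one_eq_nil (by omega)]
    rfl
  | case2 acc idx h hm =>
    intro hpre
    exfalso
    rw [PySem.List.pyGet?_eq_none_iff] at hm
    exact hm ⟨hpre, by omega⟩
  | case3 acc idx h line_type content hm actions combinations actions2 combinations2 ih =>
    intro hpre
    rw [fold_lines_alt_step parsed_lines acc idx (by omega), hm]
    rw [ih (by omega)]
    congr 1
    simp only [actions2, combinations2, actions, combinations]
    by_cases ha : line_type == "action"
    · simp only [ha, if_true]
      by_cases hc : (PySem.Dict.mk acc.1).contains content.1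
      · simp [hc, PySem.Dict.modify]
      · have hgd : (PySem.Dict.mk acc.1).getD content.1 [] = [] :=
          PySem.Dict.getD_of_not_contains _ _ (Bool.eq_false_iff.mpr hc)
        simp [hc, PySem.Dict.modify, hgd]
    · by_cases hb : line_type == "combination" <;> simp [ha, hb]

-- ===== VERDICT (by name: the statement is the Claim_ definition above) =====
theorem fold_lines_spec : Claim_equal_fold_lines := by
  intro parsed_lines accumulators index _dom hpre
  unfold Spec_fold_lines
  exact fold_lines_eq_alt parsed_lines accumulators index hpre
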